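-- pv_equiv track=rewrite | github.com/LucaSforza/algoritmi2 | algo2/batteria 1 /es2/es2_ls.py | es2ls
-- ===== SOURCE A (Python) =====
-- def count_zero(l:list[int]) -> int:
--     result = 0
--     for i in l:
--         if i == 0:
--             result+=1
--     return result
--
-- def es2ls(S: list[int], k:int ) -> int:
--     #TODO il caso tutti 0 deve tornare n-1
--     n = len(S)
--     max_z_cnt = 0
--     z_cnt = 0
--     numbers = []
--     for y in reversed(range(n + 1)):
--         for x in range(n + 1):
--             if x+(n-y) > n:
--                 break
--             z_cnt += count_zero(S[:x])
--             z_cnt += count_zero(S[y:])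
--             numbers.extend(S[:x])
--             numbers.extend(S[y:])
--             if sum(numbers) <= k:
--                 if max_z_cnt < z_cnt:
--                     max_z_cnt = z_cnt
--             z_cnt = 0
--             numbers.clear()
--     return max_z_cnt
-- ===== SOURCE B (Python) =====
-- def es2ls(S: list[int], k: int) -> int:
--     pre_sum = [0]
--     pre_z = [0]
--     for v in S:
--         pre_sum.append(pre_sum[-1] + v)
--         pre_z.append(pre_z[-1] + (1 if v == 0 else 0))
--     n = len(S)
--     total = pre_sum[n]
--     tz = pre_z[n]
--     best = 0
--     for x in range(n + 1):
--         for y in range(x, n + 1):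
--             if pre_sum[x] + total - pre_sum[y] <= k:
--                 z = pre_z[x] + tz - pre_z[y]
--                 if z > best:
--                     best = z
--     return best
-- ===== Notes on version B (the rewrite author's own statement) =====
-- stated objective: faster
-- what changed: Replaces A's triple-nested recomputation (slices, count_zero and sum rebuilt for every (x,y) pair) by one pass building prefix sums and prefix zero-counts, then an O(1) check per pair.
import Mathlib
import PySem

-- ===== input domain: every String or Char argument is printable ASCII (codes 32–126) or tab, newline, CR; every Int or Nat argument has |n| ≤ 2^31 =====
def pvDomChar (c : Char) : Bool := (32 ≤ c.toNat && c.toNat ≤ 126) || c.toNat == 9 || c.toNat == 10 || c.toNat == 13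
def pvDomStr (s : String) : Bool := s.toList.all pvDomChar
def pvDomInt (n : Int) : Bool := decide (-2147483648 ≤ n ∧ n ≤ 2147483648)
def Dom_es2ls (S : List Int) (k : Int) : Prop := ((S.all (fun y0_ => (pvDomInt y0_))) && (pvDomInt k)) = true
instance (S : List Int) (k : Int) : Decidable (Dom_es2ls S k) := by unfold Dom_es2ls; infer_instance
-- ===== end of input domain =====

-- B replaces A's triple-nested recomputation by prefix sums / prefix zero-counts with an O(1) check per (x, y) pair (objective: faster).


-- ===== PORT A =====
def count_zero (l : List Int) : Int :=
  l.foldl (fun result i => if i == 0 then result + 1 else result) 0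

-- A's inner `for x in range(n+1)` loop with its break; state = (max_z_cnt, z_cnt, numbers)
def es2lsInner (S : List Int) (k n y : Int) :
    List Int → Int × Int × List Int → Int × Int × List Int
  | [], st => st
  | x :: xs, st =>
      if x + (n - y) > n then st   -- break
      else
        let z2 := st.2.1 + count_zero (PySem.List.slice S none (some x))
                        + count_zero (PySem.List.slice S (some y) none)
        let nums2 := st.2.2 ++ PySem.List.slice S none (some x) ++ PySem.List.slice S (some y) none
        let m2 := if nums2.sum ≤ k then (if st.1 < z2 then z2 else st.1) else st.1
        es2lsInner S k n y xs (m2, 0, [])    -- z_cnt = 0; numbers.clear()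

def es2ls (S : List Int) (k : Int) : Int :=
  let n : Int := S.length
  (((PySem.List.pyRange 0 (n + 1) 1).reverse).foldl
      (fun st y => es2lsInner S k n y (PySem.List.pyRange 0 (n + 1) 1) st)
      (0, 0, [])).1

-- ===== PORT B =====
-- Source B's first loop: grow pre_sum / pre_z by appending last + v (resp. last + (1 if v == 0 else 0))
def es2lsPrefixes : List Int → List Int × List Int → List Int × List Int
  | [], st => st
  | v :: rest, st =>
      es2lsPrefixes rest
        (st.1 ++ [PySem.List.pyGetD st.1 (-1) 0 + v],
         st.2 ++ [PySem.List.pyGetD st.2 (-1) 0 + (if v == 0 then 1 else 0)])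

def es2ls_alt (S : List Int) (k : Int) : Int :=
  let pr := es2lsPrefixes S ([0], [0])
  let preSum := pr.1
  let preZ := pr.2
  let n : Int := S.length
  let total := PySem.List.pyGetD preSum n 0
  let tz := PySem.List.pyGetD preZ n 0
  (PySem.List.pyRange 0 (n + 1) 1).foldl (fun best x =>
    (PySem.List.pyRange x (n + 1) 1).foldl (fun best y =>
      if PySem.List.pyGetD preSum x 0 + total - PySem.List.pyGetD preSum y 0 ≤ k then
        let z := PySem.List.pyGetD preZ x 0 + tz - PySem.List.pyGetD preZ y 0
        if z > best then z else best
      else best) best) 0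

-- ===== PRECONDITION & SPEC =====
def Spec_es2ls (S : List Int) (k : Int) (out : Int) : Prop := out = es2ls_alt S k
instance (S : List Int) (k : Int) (out : Int) : Decidable (Spec_es2ls S k out) := by unfold Spec_es2ls; infer_instance

-- ===== CLAIM (what is proved, stated in full; the proofs are below) =====
def Claim_equal_es2ls : Prop := ∀ (S : List Int) (k : Int), Dom_es2ls S k → Spec_es2ls S k (es2ls S k)

-- ===== LEMMAS AND PROOFS =====

-- the candidate value of the pair (x, y): zeros in S[:x] + S[y:] when their sum fits in k, else 0
def pvVal (S : List Int) (k x y : Int) : Int :=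
  if (S.take x.toNat).sum + (S.drop y.toNat).sum ≤ k then
    ((S.take x.toNat).countP (fun i => i == 0) : Int) + ((S.drop y.toNat).countP (fun i => i == 0) : Int)
  else 0

lemma count_zero_eq (l : List Int) : count_zero l = (l.countP (fun i => i == 0) : Int) := by
  unfold count_zero
  rw [PySem.List.foldl_count_if (fun i => i == 0) l 0]
  simp

lemma foldl_zeros (l : List Int) (a : Int) :
    l.foldl (fun s v => s + if v == 0 then 1 else 0) a = a + (l.countP (fun i => i == 0) : Int) := by
  have hfe : (fun (s v : Int) => s + if v == 0 then 1 else 0)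
      = (fun (s v : Int) => if v == 0 then s + 1 else s) := by
    funext s v; split <;> simp
  rw [hfe]
  exact PySem.List.foldl_count_if (fun i => i == 0) l a

-- characterisation of a left fold with max
lemma foldl_max_char (l : List Int) (a : Int) :
    (∀ x ∈ l, x ≤ l.foldl max a) ∧ a ≤ l.foldl max a ∧ (l.foldl max a = a ∨ l.foldl max a ∈ l) := by
  induction l generalizing a with
  | nil => simp
  | cons x xs ih =>
    obtain ⟨h1, h2, h3⟩ := ih (max a x)
    simp only [List.foldl_cons]
    refine ⟨?_, le_trans (le_max_left a x) h2, ?_⟩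
    · intro v hv
      rcases List.mem_cons.mp hv with rfl | hv
      · exact le_trans (le_max_right a v) h2
      · exact h1 v hv
    · rcases h3 with h | h
      · rcases max_choice a x with hc | hc
        · exact Or.inl (by rw [h, hc])
        · exact Or.inr (by rw [h, hc]; exact List.mem_cons_self ..)
      · exact Or.inr (List.mem_cons_of_mem _ h)

lemma foldl_max_eq_of_mem_iff (l₁ l₂ : List Int) (a : Int)
    (h : ∀ v, v ∈ l₁ ↔ v ∈ l₂) : l₁.foldl max a = l₂.foldl max a := by
  obtain ⟨h1, h2, h3⟩ := foldl_max_char l₁ a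
  obtain ⟨g1, g2, g3⟩ := foldl_max_char l₂ a
  apply le_antisymm
  · rcases h3 with e | m
    · rw [e]; exact g2
    · exact g1 _ ((h _).mp m)
  · rcases g3 with e | m
    · rw [e]; exact h2
    · exact h1 _ ((h _).mpr m)

-- ==== A-side reduction ====

lemma es2lsInner_eq (S : List Int) (k y : Int) (hy0 : 0 ≤ y) (hyn : y ≤ (S.length : Int)) :
    ∀ (fuel : Nat) (a m : Int), 0 ≤ a → 0 ≤ m → ((S.length : Int) + 1 - a).toNat ≤ fuel →
      es2lsInner S k (S.length : Int) y (PySem.List.pyRange a ((S.length : Int) + 1) 1) (m, 0, []) =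
        ((PySem.List.pyRange a (y + 1) 1).foldl (fun m x => max m (pvVal S k x y)) m, 0, []) := by
  intro fuel
  induction fuel with
  | zero =>
    intro a m ha hm hf
    rw [PySem.List.pyRange_one_eq_nil (by omega), PySem.List.pyRange_one_eq_nil (by omega)]
    rfl
  | succ f ih =>
    intro a m ha hm hf
    by_cases hab : (S.length : Int) + 1 <= a
    · rw [PySem.List.pyRange_one_eq_nil hab, PySem.List.pyRange_one_eq_nil (by omega)]; rfl
    · rw [PySem.List.pyRange_one_cons (by omega)]
      by_cases hay : a <= y
      · simp only [es2lsInner]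
        rw [if_neg (by omega)]
        simp only [PySem.List.slice_to S ha, PySem.List.slice_from S hy0, count_zero_eq,
          List.nil_append, List.sum_append]
        have hm2 : (if (S.take a.toNat).sum + (S.drop y.toNat).sum <= k then
            if m < 0 + ((S.take a.toNat).countP (fun i => i == 0) : Int)
                + ((S.drop y.toNat).countP (fun i => i == 0) : Int) then
              0 + ((S.take a.toNat).countP (fun i => i == 0) : Int)
                + ((S.drop y.toNat).countP (fun i => i == 0) : Int)
            else m
          else m) = max m (pvVal S k a y) := by
          unfold pvVal
          by_cases hc : (S.take a.toNat).sum + (S.drop y.toNat).sum <= k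
          · rw [if_pos hc, if_pos hc]
            rcases le_or_gt (((S.take a.toNat).countP (fun i => i == 0) : Int)
                + ((S.drop y.toNat).countP (fun i => i == 0) : Int)) m with h | h
            · rw [if_neg (by omega), max_eq_left h]
            · rw [if_pos (by omega), max_eq_right (by omega)]; omega
          · rw [if_neg hc, if_neg hc, max_eq_left hm]
        rw [hm2, ih (a + 1) _ (by omega) (le_trans hm (le_max_left _ _)) (by omega),
          PySem.List.pyRange_one_cons (by omega : a < y + 1), List.foldl_cons]
      · simp only [es2lsInner]
        rw [if_pos (by omega), PySem.List.pyRange_one_eq_nil (by omega : y + 1 <= a)]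
        rfl

lemma es2ls_outer (S : List Int) (k : Int) :
    ∀ (ys : List Int) (m : Int), 0 ≤ m → (∀ y ∈ ys, 0 ≤ y ∧ y ≤ (S.length : Int)) →
      (ys.foldl (fun st y => es2lsInner S k (S.length : Int) y
          (PySem.List.pyRange 0 ((S.length : Int) + 1) 1) st) (m, 0, [])).1
        = (ys.flatMap (fun y => (PySem.List.pyRange 0 (y + 1) 1).map (fun x => pvVal S k x y))).foldl max m := by
  intro ys
  induction ys with
  | nil => intro m _ _; rfl
  | cons y ys ih =>
    intro m hm hys
    obtain ⟨hy0, hyn⟩ := hys y (List.mem_cons_self ..)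
    simp only [List.foldl_cons]
    rw [es2lsInner_eq S k y hy0 hyn ((S.length : Int) + 1).toNat 0 m le_rfl hm (by omega)]
    have hM : (PySem.List.pyRange 0 (y + 1) 1).foldl (fun m x => max m (pvVal S k x y)) m
        = ((PySem.List.pyRange 0 (y + 1) 1).map (fun x => pvVal S k x y)).foldl max m := by
      rw [List.foldl_map]
    rw [hM, ih _ (le_trans hm (foldl_max_char _ m).2.1)
      (fun y hy => hys y (List.mem_cons_of_mem _ hy))]
    rw [List.flatMap_cons, List.foldl_append]

lemma es2ls_eq_foldl (S : List Int) (k : Int) :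
    es2ls S k =
      (((PySem.List.pyRange 0 ((S.length : Int) + 1) 1).reverse).flatMap
        (fun y => (PySem.List.pyRange 0 (y + 1) 1).map (fun x => pvVal S k x y))).foldl max 0 := by
  unfold es2ls
  exact es2ls_outer S k _ 0 le_rfl (fun y hy => by
    rw [List.mem_reverse, PySem.List.mem_pyRange_one] at hy; omega)

-- ==== B-side reduction ====

lemma prefixes_eq : ∀ (l ps pz : List Int) (a b : Int),
    es2lsPrefixes l (ps ++ [a], pz ++ [b]) =
      (ps ++ l.scanl (fun s v => s + v) a, pz ++ l.scanl (fun s v => s + if v == 0 then 1 else 0) b) := by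
  intro l
  induction l with
  | nil => intro ps pz a b; simp [es2lsPrefixes]
  | cons v rest ih =>
    intro ps pz a b
    simp only [es2lsPrefixes, PySem.List.pyGetD_neg_one_append_singleton]
    rw [ih (ps ++ [a]) (pz ++ [b]) (a + v) (b + if v == 0 then 1 else 0)]
    simp [List.scanl, List.append_assoc]

lemma pyGetD_scanl (l : List Int) (f : Int → Int → Int) (b : Int) (i : Int)
    (h0 : 0 ≤ i) (h1 : i ≤ (l.length : Int)) :
    PySem.List.pyGetD (l.scanl f b) i 0 = (l.take i.toNat).foldl f b := by
  rw [PySem.List.pyGetD_eq_getElem _ _ h0 (by simp [List.length_scanl]; omega)]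
  exact List.getElem_scanl _

lemma preSum_get (S : List Int) (i : Int) (h0 : 0 ≤ i) (h1 : i ≤ (S.length : Int)) :
    PySem.List.pyGetD (S.scanl (fun s v => s + v) 0) i 0 = (S.take i.toNat).sum := by
  rw [pyGetD_scanl _ _ _ _ h0 h1]
  simpa using PySem.List.foldl_add (S.take i.toNat) (fun v : Int => v) 0

lemma preZ_get (S : List Int) (i : Int) (h0 : 0 ≤ i) (h1 : i ≤ (S.length : Int)) :
    PySem.List.pyGetD (S.scanl (fun s v => s + if v == 0 then 1 else 0) 0) i 0
      = ((S.take i.toNat).countP (fun i => i == 0) : Int) := by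
  rw [pyGetD_scanl _ _ _ _ h0 h1, foldl_zeros]
  simp

lemma bodyB_eq (S : List Int) (k x y best : Int) (hx0 : 0 ≤ x) (hxn : x ≤ (S.length : Int))
    (hy0 : 0 ≤ y) (hyn : y ≤ (S.length : Int)) (hbest : 0 ≤ best) :
    (if PySem.List.pyGetD (S.scanl (fun s v => s + v) 0) x 0
          + PySem.List.pyGetD (S.scanl (fun s v => s + v) 0) (S.length : Int) 0
          - PySem.List.pyGetD (S.scanl (fun s v => s + v) 0) y 0 ≤ k then
        let z := PySem.List.pyGetD (S.scanl (fun s v => s + if v == 0 then 1 else 0) 0) x 0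
          + PySem.List.pyGetD (S.scanl (fun s v => s + if v == 0 then 1 else 0) 0) (S.length : Int) 0
          - PySem.List.pyGetD (S.scanl (fun s v => s + if v == 0 then 1 else 0) 0) y 0
        if z > best then z else best
      else best) = max best (pvVal S k x y) := by
  rw [preSum_get S x hx0 hxn, preSum_get S y hy0 hyn, preSum_get S _ (by positivity) le_rfl,
      preZ_get S x hx0 hxn, preZ_get S y hy0 hyn, preZ_get S _ (by positivity) le_rfl]
  simp only [Int.toNat_natCast, List.take_length]
  have hsum : (S.take x.toNat).sum + S.sum - (S.take y.toNat).sum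
      = (S.take x.toNat).sum + (S.drop y.toNat).sum := by
    have := List.sum_take_add_sum_drop S y.toNat; omega
  have hcnt : (S.countP (fun i => i == 0) : Int)
      = ((S.take y.toNat).countP (fun i => i == 0) : Int)
        + ((S.drop y.toNat).countP (fun i => i == 0) : Int) := by
    conv_lhs => rw [← List.take_append_drop y.toNat S]
    rw [List.countP_append]; push_cast; ring
  rw [hsum]
  unfold pvVal
  by_cases hc : (S.take x.toNat).sum + (S.drop y.toNat).sum ≤ k
  · rw [if_pos hc, if_pos hc, hcnt]
    have he : ((S.take x.toNat).countP (fun i => i == 0) : Int)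
        + (((S.take y.toNat).countP (fun i => i == 0) : Int)
          + ((S.drop y.toNat).countP (fun i => i == 0) : Int))
        - ((S.take y.toNat).countP (fun i => i == 0) : Int)
        = ((S.take x.toNat).countP (fun i => i == 0) : Int)
          + ((S.drop y.toNat).countP (fun i => i == 0) : Int) := by ring
    rw [he]
    rcases le_or_gt (((S.take x.toNat).countP (fun i => i == 0) : Int)
        + ((S.drop y.toNat).countP (fun i => i == 0) : Int)) best with h | h
    · rw [if_neg (by omega), max_eq_left h]
    · rw [if_pos (by omega), max_eq_right (le_of_lt h)]
  · rw [if_neg hc, if_neg hc, max_eq_left hbest]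

lemma es2lsB_inner (S : List Int) (k x : Int) (hx0 : 0 ≤ x) (hxn : x ≤ (S.length : Int)) :
    ∀ (ys : List Int) (best : Int), 0 ≤ best → (∀ y ∈ ys, 0 ≤ y ∧ y ≤ (S.length : Int)) →
      ys.foldl (fun best y =>
        if PySem.List.pyGetD (S.scanl (fun s v => s + v) 0) x 0
            + PySem.List.pyGetD (S.scanl (fun s v => s + v) 0) (S.length : Int) 0
            - PySem.List.pyGetD (S.scanl (fun s v => s + v) 0) y 0 ≤ k then
          let z := PySem.List.pyGetD (S.scanl (fun s v => s + if v == 0 then 1 else 0) 0) x 0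
            + PySem.List.pyGetD (S.scanl (fun s v => s + if v == 0 then 1 else 0) 0) (S.length : Int) 0
            - PySem.List.pyGetD (S.scanl (fun s v => s + if v == 0 then 1 else 0) 0) y 0
          if z > best then z else best
        else best) best
      = ys.foldl (fun b y => max b (pvVal S k x y)) best := by
  intro ys
  induction ys with
  | nil => intro best _ _; rfl
  | cons y ys ih =>
    intro best hb hys
    obtain ⟨hy0, hyn⟩ := hys y (List.mem_cons_self ..)
    simp only [List.foldl_cons]
    rw [bodyB_eq S k x y best hx0 hxn hy0 hyn hb]
    exact ih (max best (pvVal S k x y)) (le_trans hb (le_max_left _ _))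
      (fun y hy => hys y (List.mem_cons_of_mem _ hy))

lemma es2lsB_outer (S : List Int) (k : Int) :
    ∀ (xs : List Int) (best : Int), 0 ≤ best → (∀ x ∈ xs, 0 ≤ x ∧ x ≤ (S.length : Int)) →
      xs.foldl (fun best x =>
        (PySem.List.pyRange x ((S.length : Int) + 1) 1).foldl (fun best y =>
          if PySem.List.pyGetD (S.scanl (fun s v => s + v) 0) x 0
              + PySem.List.pyGetD (S.scanl (fun s v => s + v) 0) (S.length : Int) 0
              - PySem.List.pyGetD (S.scanl (fun s v => s + v) 0) y 0 ≤ k then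
            let z := PySem.List.pyGetD (S.scanl (fun s v => s + if v == 0 then 1 else 0) 0) x 0
              + PySem.List.pyGetD (S.scanl (fun s v => s + if v == 0 then 1 else 0) 0) (S.length : Int) 0
              - PySem.List.pyGetD (S.scanl (fun s v => s + if v == 0 then 1 else 0) 0) y 0
            if z > best then z else best
          else best) best) best
      = (xs.flatMap (fun x => (PySem.List.pyRange x ((S.length : Int) + 1) 1).map
          (fun y => pvVal S k x y))).foldl max best := by
  intro xs
  induction xs with
  | nil => intro best _ _; rfl
  | cons x xs ih =>
    intro best hb hxs
    obtain ⟨hx0, hxn⟩ := hxs x (List.mem_cons_self ..)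
    simp only [List.foldl_cons]
    rw [es2lsB_inner S k x hx0 hxn _ best hb (fun y hy => by
      rw [PySem.List.mem_pyRange_one] at hy; omega)]
    have hM : (PySem.List.pyRange x ((S.length : Int) + 1) 1).foldl (fun b y => max b (pvVal S k x y)) best
        = ((PySem.List.pyRange x ((S.length : Int) + 1) 1).map (fun y => pvVal S k x y)).foldl max best := by
      rw [List.foldl_map]
    rw [hM, ih _ (le_trans hb (foldl_max_char _ best).2.1)
      (fun x hx => hxs x (List.mem_cons_of_mem _ hx))]
    rw [List.flatMap_cons, List.foldl_append]

lemma es2ls_alt_eq_foldl (S : List Int) (k : Int) :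
    es2ls_alt S k =
      ((PySem.List.pyRange 0 ((S.length : Int) + 1) 1).flatMap
        (fun x => (PySem.List.pyRange x ((S.length : Int) + 1) 1).map (fun y => pvVal S k x y))).foldl max 0 := by
  unfold es2ls_alt
  rw [show (([0] : List Int), ([0] : List Int)) = (([] : List Int) ++ [0], ([] : List Int) ++ [0]) by simp,
    prefixes_eq]
  simp only [List.nil_append]
  exact es2lsB_outer S k _ 0 le_rfl (fun x hx => by
    rw [PySem.List.mem_pyRange_one] at hx; omega)

-- ===== VERDICT (by name: the statement is the Claim_ definition above) =====
theorem es2ls_spec : Claim_equal_es2ls := by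
  intro S k _
  unfold Spec_es2ls
  rw [es2ls_eq_foldl, es2ls_alt_eq_foldl]
  apply foldl_max_eq_of_mem_iff
  intro v
  simp only [List.mem_flatMap, List.mem_map, List.mem_reverse, PySem.List.mem_pyRange_one]
  constructor
  · rintro ⟨y, ⟨hy0, hy1⟩, x, ⟨hx0, hx1⟩, rfl⟩
    exact ⟨x, ⟨hx0, by omega⟩, y, ⟨by omega, hy1⟩, rfl⟩
  · rintro ⟨x, ⟨hx0, hx1⟩, y, ⟨hy0, hy1⟩, rfl⟩
    exact ⟨y, ⟨by omega, hy1⟩, x, ⟨hx0, by omega⟩, rfl⟩
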